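-- pv_equiv track=rewrite | github.com/wagtail/wagtail | mysite/env/lib/python3.10/site-packages/boltons/iterutils.py | rstrip_iter
-- ===== SOURCE A (Python) =====
-- def rstrip_iter(iterable, strip_value=None):
--     """Strips values from the end of an iterable. Stripped items will
--     match the value of the argument strip_value. Functionality is analigous
--     to that of the method str.rstrip. Returns a generator.
--
--     >>> list(rstrip_iter(['Foo', 'Bar', 'Bam'], 'Bam'))
--     ['Foo', 'Bar']
--
--     """
--     iterator = iter(iterable)
--     for i in iterator:
--         if i == strip_value:
--             cache = list()
--             cache.append(i)
--             broken = False
--             for i in iterator: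
--                 if i == strip_value:
--                     cache.append(i)
--                 else:
--                     broken = True
--                     break
--             if not broken: # Return to caller here because the end of the
--                 return     # iterator has been reached
--             for t in cache:
--                 yield t
--         yield i
-- ===== SOURCE B (Python) =====
-- def rstrip_iter(iterable, strip_value=None):
--     """Strips values equal to strip_value from the end of iterable; generator."""
--     cache = []
--     for item in iterable:
--         if item == strip_value:
--             cache.append(item)
--         else:
--             for t in cache:
--                 yield t
--             cache = []
--             yield item
--     # whatever remains in cache is the stripped tail: drop it
-- ===== Notes on version B (the rewrite author's own statement) =====
-- stated objective: simpler
-- what changed: Replaced A's nested consume-loop with its 'broken' sentinel and early return by one flat loop over the iterable with a single buffer that is flushed before each non-matching item and silently dropped at the end.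
import Mathlib
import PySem

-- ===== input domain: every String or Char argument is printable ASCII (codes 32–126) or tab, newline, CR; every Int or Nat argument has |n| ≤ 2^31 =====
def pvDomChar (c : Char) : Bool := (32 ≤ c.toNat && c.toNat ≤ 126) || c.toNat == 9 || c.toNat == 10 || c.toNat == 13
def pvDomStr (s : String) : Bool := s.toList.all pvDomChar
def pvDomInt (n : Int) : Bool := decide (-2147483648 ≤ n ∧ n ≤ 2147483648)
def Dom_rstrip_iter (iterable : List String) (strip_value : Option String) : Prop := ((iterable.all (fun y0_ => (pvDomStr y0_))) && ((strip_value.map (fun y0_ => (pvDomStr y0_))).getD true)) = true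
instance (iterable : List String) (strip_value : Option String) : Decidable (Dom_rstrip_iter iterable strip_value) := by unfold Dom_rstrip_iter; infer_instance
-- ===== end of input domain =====

-- B replaces A's nested consume-loop, its 'broken' sentinel and early return by one flat
-- buffer-flush loop over the list (objective: simpler); same return value, no side effects.


-- ===== PORT A =====
-- A's inner 'for i in iterator' loop: appends matching items to cache, stops at the
-- first non-matching item j ('broken = True; break'), returning the rest of the iterator.
def rstripConsume (strip_value : Option String) (cache : List String) :
    List String → List String × Option (String × List String)
  | [] => (cache, none)
  | j :: rest =>
      if some j == strip_value then rstripConsume strip_value (cache ++ [j]) rest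
      else (cache, some (j, rest))
-- needed by rstrip_iter's decreasing_by
theorem rstripConsume_len (strip_value : Option String) :
    ∀ (l cache cache' : List String) (j : String) (rest' : List String),
      rstripConsume strip_value cache l = (cache', some (j, rest')) →
      rest'.length < l.length := by
  intro l
  induction l with
  | nil => intro _ _ _ _ h; simp [rstripConsume] at h
  | cons x xs ih =>
      intro cache cache' j rest' h
      rw [rstripConsume] at h
      split at h
      · exact Nat.lt_trans (ih _ _ _ _ h) (Nat.lt_succ_self _)
      · simp only [Prod.mk.injEq, Option.some.injEq] at h
        obtain ⟨-, rfl, rfl⟩ := h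
        simp
-- outer 'for i in iterator' loop of A
def rstrip_iter (iterable : List String) (strip_value : Option String) : List String :=
  match iterable with
  | [] => []
  | i :: rest =>
      if some i == strip_value then
        match h : rstripConsume strip_value [i] rest with
        | (_, none) => []
        | (cache, some (j, rest')) =>
            cache ++ j :: rstrip_iter rest' strip_value
      else i :: rstrip_iter rest strip_value
termination_by iterable.length
decreasing_by
  · exact Nat.lt_succ_of_lt (rstripConsume_len strip_value rest [i] _ _ _ h)
  · simp
-- ===== PORT B =====
-- one flat loop: buffer matching items; on a non-match flush the buffer then emit the
-- item; the buffer left over at the end is the stripped tail and is dropped.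
def rstrip_iter_alt (iterable : List String) (strip_value : Option String) : List String :=
  (iterable.foldl
    (fun (st : List String × List String) item =>
      if some item == strip_value then (st.1, st.2 ++ [item])
      else (st.1 ++ st.2 ++ [item], []))
    ([], [])).1


-- ===== PRECONDITION & SPEC =====
-- A is total (the generator always terminates on a list), so no Pre_ is needed.
def Spec_rstrip_iter (iterable : List String) (strip_value : Option String) (out : List String) : Prop := out = rstrip_iter_alt iterable strip_value
instance (iterable : List String) (strip_value : Option String) (out : List String) : Decidable (Spec_rstrip_iter iterable strip_value out) := by unfold Spec_rstrip_iter; infer_instance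

-- ===== CLAIM (what is proved, stated in full; the proofs are below) =====
def Claim_equal_rstrip_iter : Prop := ∀ (iterable : List String) (strip_value : Option String), Dom_rstrip_iter iterable strip_value → Spec_rstrip_iter iterable strip_value (rstrip_iter iterable strip_value)

-- ===== LEMMAS AND PROOFS =====
-- reference value: the list with its trailing block of matching items removed
def rstripSpec (sv : Option String) (l : List String) : List String :=
  (l.reverse.dropWhile (fun i => some i == sv)).reverse

theorem rstripSpec_all (sv : Option String) (l : List String)
    (h : ∀ x ∈ l, (some x == sv) = true) : rstripSpec sv l = [] := by
  unfold rstripSpec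
  rw [List.dropWhile_eq_nil_iff.2 (by intro x hx; exact h x (List.mem_reverse.1 hx))]
  rfl

theorem rstripSpec_append_nonmatch (sv : Option String) (xs ys : List String) (j : String)
    (hj : (some j == sv) = false) :
    rstripSpec sv (xs ++ j :: ys) = xs ++ j :: rstripSpec sv ys := by
  unfold rstripSpec
  rw [show (xs ++ j :: ys).reverse = ys.reverse ++ (j :: xs.reverse) by simp,
      List.dropWhile_append]
  split
  · next h =>
      rw [List.dropWhile_cons_of_neg (by simp [hj])]
      have : ys.reverse.dropWhile (fun i => some i == sv) = [] := by
        simpa [List.isEmpty_iff] using h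
      simp [this]
  · simp

theorem rstripSpec_cons_nonmatch (sv : Option String) (ys : List String) (j : String)
    (hj : (some j == sv) = false) :
    rstripSpec sv (j :: ys) = j :: rstripSpec sv ys :=
  rstripSpec_append_nonmatch sv [] ys j hj

theorem rstripSpec_cons_match (sv : Option String) (ys : List String) (j : String)
    (hj : (some j == sv) = true) :
    rstripSpec sv (j :: ys) = if rstripSpec sv ys = [] then [] else j :: rstripSpec sv ys := by
  unfold rstripSpec
  rw [show (j :: ys).reverse = ys.reverse ++ [j] by simp, List.dropWhile_append]
  split
  · next h =>
      have : ys.reverse.dropWhile (fun i => some i == sv) = [] := by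
        simpa [List.isEmpty_iff] using h
      simp [this, hj]
  · next h =>
      have : ¬ (ys.reverse.dropWhile (fun i => some i == sv)).reverse = [] := by
        simp [List.isEmpty_iff] at h; simp [h]
      simp [this]

theorem rstripConsume_eq (sv : Option String) :
    ∀ (l cache : List String),
      rstripConsume sv cache l =
        match l.dropWhile (fun i => some i == sv) with
        | [] => (cache ++ l, none)
        | j :: rest' => (cache ++ l.takeWhile (fun i => some i == sv), some (j, rest')) := by
  intro l
  induction l with
  | nil => intro cache; simp [rstripConsume]
  | cons x xs ih =>
      intro cache
      by_cases hx : (some x == sv) = true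
      · rw [show rstripConsume sv cache (x :: xs) = rstripConsume sv (cache ++ [x]) xs from by
              rw [rstripConsume, if_pos hx],
            ih, List.dropWhile_cons_of_pos (p := fun i => some i == sv) (l := xs) hx,
            List.takeWhile_cons_of_pos (p := fun i => some i == sv) (l := xs) hx]
        cases h : xs.dropWhile (fun i => some i == sv) <;> simp
      · rw [rstripConsume, if_neg hx,
            List.dropWhile_cons_of_neg (p := fun i => some i == sv) (l := xs) hx,
            List.takeWhile_cons_of_neg (p := fun i => some i == sv) (l := xs) hx]
        simp

theorem rstrip_iter_eq_spec (sv : Option String) :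
    ∀ (l : List String), rstrip_iter l sv = rstripSpec sv l := by
  intro l
  induction l using rstrip_iter.induct sv with
  | case1 => rw [rstrip_iter]; rfl
  | case2 i rest hi cache' h =>
      rw [rstrip_iter, if_pos hi]
      split
      · next heq =>
          refine (rstripSpec_all sv (i :: rest) ?_).symm
          rw [rstripConsume_eq] at heq
          cases hdw : rest.dropWhile (fun i => some i == sv) with
          | nil =>
              intro x hx
              rcases List.mem_cons.1 hx with rfl | hx
              · exact hi
              · exact (List.dropWhile_eq_nil_iff.1 hdw) x hx
          | cons j rest' => rw [hdw] at heq; simp at heq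
      · next heq => rw [h] at heq; simp at heq
  | case3 i rest hi cache j rest' h ih =>
      rw [rstrip_iter, if_pos hi]
      split
      · next heq => rw [h] at heq; simp at heq
      · next c2 j2 r2 heq =>
          rw [h] at heq
          simp only [Prod.mk.injEq, Option.some.injEq] at heq
          obtain ⟨rfl, rfl, rfl⟩ := heq
          rw [rstripConsume_eq] at h
          cases hdw : rest.dropWhile (fun i => some i == sv) with
          | nil => rw [hdw] at h; simp at h
          | cons j' rest'' =>
              rw [hdw] at h
              simp only [Prod.mk.injEq, Option.some.injEq] at h
              obtain ⟨hc, rfl, rfl⟩ := h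
              have hj : (some j' == sv) = false := by
                have h5 := List.head?_dropWhile_not (p := fun i => some i == sv) (l := rest)
                rw [hdw] at h5; simpa using h5
              have hsplit : rest = rest.takeWhile (fun i => some i == sv) ++ j' :: rest'' := by
                conv_lhs => rw [← List.takeWhile_append_dropWhile (p := fun i => some i == sv) (l := rest)]
                rw [hdw]
              rw [ih, ← hc,
                show rstripSpec sv (i :: rest)
                    = rstripSpec sv ((i :: rest.takeWhile (fun i => some i == sv)) ++ j' :: rest'') from by
                  (conv_lhs => rw [hsplit]); rfl,
                rstripSpec_append_nonmatch sv _ _ j' hj]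
              simp
  | case4 i rest hi ih =>
      rw [rstrip_iter, if_neg hi, ih,
          rstripSpec_cons_nonmatch sv rest i (Bool.not_eq_true _ ▸ hi)]
theorem rstrip_alt_fold (sv : Option String) :
    ∀ (l acc cache : List String),
      (l.foldl
        (fun (st : List String × List String) item =>
          if some item == sv then (st.1, st.2 ++ [item])
          else (st.1 ++ st.2 ++ [item], []))
        (acc, cache)).1
      = acc ++ (if rstripSpec sv l = [] then [] else cache ++ rstripSpec sv l) := by
  intro l
  induction l with
  | nil => intro acc cache; simp [rstripSpec]
  | cons x xs ih =>
      intro acc cache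
      rw [List.foldl_cons]
      by_cases hx : (some x == sv) = true
      · rw [show (if some x == sv then ((acc, cache).1, (acc, cache).2 ++ [x])
              else ((acc, cache).1 ++ (acc, cache).2 ++ [x], ([] : List String)))
              = (acc, cache ++ [x]) from by rw [if_pos hx],
            ih, rstripSpec_cons_match sv xs x hx]
        by_cases hxs : rstripSpec sv xs = [] <;> simp [hxs]
      · rw [show (if some x == sv then ((acc, cache).1, (acc, cache).2 ++ [x])
              else ((acc, cache).1 ++ (acc, cache).2 ++ [x], ([] : List String)))
              = (acc ++ cache ++ [x], []) from by rw [if_neg hx],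
            ih, rstripSpec_cons_nonmatch sv xs x (Bool.not_eq_true _ ▸ hx)]
        by_cases hxs : rstripSpec sv xs = [] <;> simp [hxs]

theorem rstrip_iter_alt_eq_spec (sv : Option String) (l : List String) :
    rstrip_iter_alt l sv = rstripSpec sv l := by
  unfold rstrip_iter_alt
  rw [rstrip_alt_fold sv l [] []]
  by_cases h : rstripSpec sv l = [] <;> simp [h]


-- ===== VERDICT (by name: the statement is the Claim_ definition above) =====
theorem rstrip_iter_spec : Claim_equal_rstrip_iter := by
  intro iterable strip_value _
  unfold Spec_rstrip_iter
  rw [rstrip_iter_eq_spec, rstrip_iter_alt_eq_spec]
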